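-- pv_equiv track=rewrite | github.com/AuScope/seismo-loader | seed_vault/service/seedvault.0.40.py | combine_requests
-- ===== SOURCE A (Python) =====
-- from collections import defaultdict
-- from collections import defaultdict
--
-- def combine_requests(requests):
--     """ Combine requests to
--     1) Minimize how many and
--     2) Not include data already present in our database (unless intentionally overwriting)
--     Requests can be combined for multiple stations/channels by comma separation BHZ,BHN,BHE
--     it is possible to also extend the times, but we also don't want the requests to be too large
--     so, we'll group by matching time only
--     """
--     # Group requests by network and time range
--     groups = defaultdict(list)
--     for net, sta, loc, chan, t0, t1 in requests:
--         groups[(net, t0, t1)].append((sta, loc, chan))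
--
--     # Combine requests for each group
--     combined_requests = []
--     for (net, t0, t1), items in groups.items():
--         # Combine stations, locations, and channels
--         stas = set()
--         locs = set()
--         chans = set()
--         for sta, loc, chan in items:
--             stas.add(sta)
--             locs.add(loc)
--             chans.add(chan)
--
--         # Create the combined request
--         combined_requests.append((
--             net,
--             ','.join(sorted(stas)),
--             ','.join(sorted(locs)),
--             ','.join(sorted(chans)),
--             t0,
--             t1
--         ))
--
--     return combined_requests
-- ===== SOURCE B (Python) =====
-- def combine_requests(requests):
--     """ Combine requests to
--     1) Minimize how many and
--     2) Not include data already present in our database (unless intentionally overwriting)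
--     Requests can be combined for multiple stations/channels by comma separation BHZ,BHN,BHE
--     it is possible to also extend the times, but we also don't want the requests to be too large
--     so, we'll group by matching time only
--     """
--     # No dict/grouping structure at all: collect the distinct (net, t0, t1) keys
--     # in first-seen order, then answer each key by scanning the request list with
--     # filtering set comprehensions.
--     keys = []
--     for net, sta, loc, chan, t0, t1 in requests:
--         key = (net, t0, t1)
--         if key not in keys:
--             keys.append(key)
--     return [
--         (net,
--          ','.join(sorted({s for n, s, l, c, a, b in requests if (n, a, b) == (net, t0, t1)})),
--          ','.join(sorted({l for n, s, l, c, a, b in requests if (n, a, b) == (net, t0, t1)})),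
--          ','.join(sorted({c for n, s, l, c, a, b in requests if (n, a, b) == (net, t0, t1)})),
--          t0, t1)
--         for net, t0, t1 in keys
--     ]
-- ===== Notes on version B (the rewrite author's own statement) =====
-- stated objective: alternative
-- what changed: B drops A's dict-of-lists grouping entirely: it dedupes the (net,t0,t1) keys in first-seen order by list membership, then answers each key with filtering set comprehensions that rescan the whole request list (nested scans instead of hash grouping).
import Mathlib
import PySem

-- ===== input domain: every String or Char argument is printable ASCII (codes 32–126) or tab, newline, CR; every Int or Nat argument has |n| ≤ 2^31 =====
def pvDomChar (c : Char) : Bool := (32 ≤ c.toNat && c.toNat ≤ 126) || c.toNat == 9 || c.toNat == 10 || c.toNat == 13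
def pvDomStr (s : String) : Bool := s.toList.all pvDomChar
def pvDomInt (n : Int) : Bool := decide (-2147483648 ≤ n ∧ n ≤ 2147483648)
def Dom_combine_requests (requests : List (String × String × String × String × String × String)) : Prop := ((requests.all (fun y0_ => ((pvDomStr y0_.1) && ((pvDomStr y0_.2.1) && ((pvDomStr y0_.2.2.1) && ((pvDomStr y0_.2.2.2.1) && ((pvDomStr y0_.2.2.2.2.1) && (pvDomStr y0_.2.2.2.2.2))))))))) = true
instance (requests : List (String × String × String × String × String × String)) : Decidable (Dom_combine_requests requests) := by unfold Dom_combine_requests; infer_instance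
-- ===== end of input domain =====

-- B removes A's dict-of-lists grouping: it dedupes (net,t0,t1) keys in first-seen order, then answers each key by rescanning the request list with filtering set comprehensions; objective: alternative (nested scans instead of hash grouping).


-- ===== PORT A =====
-- A: group requests into a dict keyed by (net,t0,t1), values = list of (sta,loc,chan);
-- then a second loop over the groups builds three sets from each item list and joins them.
def combine_requests (requests : List (String × String × String × String × String × String)) : List (String × String × String × String × String × String) :=
  let groups : PySem.Dict (String × String × String) (List (String × String × String)) :=
    requests.foldl (fun d r =>
      d.modify (r.1, r.2.2.2.2.1, r.2.2.2.2.2) [] (fun l => l ++ [(r.2.1, r.2.2.1, r.2.2.2.1)])) PySem.Dict.empty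
  groups.items.foldl (fun acc p =>
    let sets := p.2.foldl
      (fun s it => (PySem.Set.add s.1 it.1, PySem.Set.add s.2.1 it.2.1, PySem.Set.add s.2.2 it.2.2))
      ((PySem.Set.empty : PySem.Set String), (PySem.Set.empty : PySem.Set String), (PySem.Set.empty : PySem.Set String))
    acc ++ [(p.1.1,
             PySem.Str.join "," (PySem.List.sorted sets.1 (fun x => x) false),
             PySem.Str.join "," (PySem.List.sorted sets.2.1 (fun x => x) false),
             PySem.Str.join "," (PySem.List.sorted sets.2.2 (fun x => x) false),
             p.1.2.1, p.1.2.2)]) []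

-- ===== PORT B =====
-- B: dedupe (net,t0,t1) keys in first-seen order by list membership, then for each key
-- build the three sets by filtering set comprehensions over the whole request list.
def combine_requests_alt (requests : List (String × String × String × String × String × String)) : List (String × String × String × String × String × String) :=
  let keys : List (String × String × String) :=
    requests.foldl (fun ks r =>
      let key := (r.1, r.2.2.2.2.1, r.2.2.2.2.2)
      if ks.contains key then ks else ks ++ [key]) []
  keys.map (fun k =>
    (k.1,
     PySem.Str.join "," (PySem.List.sorted (PySem.Set.ofList ((requests.filter (fun r => (r.1, r.2.2.2.2.1, r.2.2.2.2.2) == k)).map (fun r => r.2.1))) (fun x => x) false),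
     PySem.Str.join "," (PySem.List.sorted (PySem.Set.ofList ((requests.filter (fun r => (r.1, r.2.2.2.2.1, r.2.2.2.2.2) == k)).map (fun r => r.2.2.1))) (fun x => x) false),
     PySem.Str.join "," (PySem.List.sorted (PySem.Set.ofList ((requests.filter (fun r => (r.1, r.2.2.2.2.1, r.2.2.2.2.2) == k)).map (fun r => r.2.2.2.1))) (fun x => x) false),
     k.2.1, k.2.2))

-- ===== PRECONDITION & SPEC =====
def Spec_combine_requests (requests : List (String × String × String × String × String × String)) (out : List (String × String × String × String × String × String)) : Prop := out = combine_requests_alt requests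
instance (requests : List (String × String × String × String × String × String)) (out : List (String × String × String × String × String × String)) : Decidable (Spec_combine_requests requests out) := by unfold Spec_combine_requests; infer_instance

-- ===== CLAIM (what is proved, stated in full; the proofs are below) =====
def Claim_equal_combine_requests : Prop := ∀ (requests : List (String × String × String × String × String × String)), Dom_combine_requests requests → Spec_combine_requests requests (combine_requests requests)

-- ===== LEMMAS AND PROOFS =====

-- value of a modify-loop at one key: only the entries whose key matches contribute, in order
lemma getD_foldl_modify_key {κ β ν : Type} [BEq κ] [LawfulBEq κ] [DecidableEq κ]
    (l : List β) (key : β → κ) (f : β → ν → ν) (d : PySem.Dict κ ν) (c : κ) (v0 : ν) :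
    (l.foldl (fun d r => d.modify (key r) v0 (f r)) d).getD c v0 =
      (l.filter (fun r => key r == c)).foldl (fun v r => f r v) (d.getD c v0) := by
  induction l generalizing d with
  | nil => rfl
  | cons r l ih =>
    simp only [List.foldl_cons, List.filter_cons]
    by_cases h : key r = c
    · subst h
      simp [ih, PySem.Dict.getD_modify_self]
    · rw [ih]
      have hb : (key r == c) = false := by simp [h]
      rw [hb]
      simp only [Bool.false_eq_true, if_false, PySem.Dict.getD_modify]
      simp [Ne.symm h]

-- a simultaneous three-set fold splits into three componentwise folds
lemma triple_fold {α β γ : Type} [BEq α] [BEq β] [BEq γ] (l : List (α × β × γ))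
    (s : PySem.Set α × PySem.Set β × PySem.Set γ) :
    l.foldl (fun s it => (PySem.Set.add s.1 it.1, PySem.Set.add s.2.1 it.2.1, PySem.Set.add s.2.2 it.2.2)) s =
      (l.foldl (fun t x => PySem.Set.add t x.1) s.1,
       l.foldl (fun t x => PySem.Set.add t x.2.1) s.2.1,
       l.foldl (fun t x => PySem.Set.add t x.2.2) s.2.2) := by
  induction l generalizing s with
  | nil => rfl
  | cons x l ih =>
    simp only [List.foldl_cons]
    exact ih _

lemma combine_requests_eq (requests : List (String × String × String × String × String × String)) :
    combine_requests requests = combine_requests_alt requests := by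
  simp only [combine_requests, combine_requests_alt]
  rw [PySem.List.foldl_append_singleton_eq_map]
  -- B's key-dedup loop is exactly Set.ofList of the mapped keys
  have hB : (requests.foldl (fun ks r =>
        let key := (r.1, r.2.2.2.2.1, r.2.2.2.2.2)
        if ks.contains key then ks else ks ++ [key]) ([] : List (String × String × String))) =
      PySem.Set.ofList (requests.map (fun r => (r.1, r.2.2.2.2.1, r.2.2.2.2.2))) := by
    rw [← PySem.Set.update_nil_left, PySem.Set.update_map_eq_foldl_add]
    rfl
  rw [hB]
  -- A's dict keys are the same deduped key list
  have hkeysA := PySem.Dict.keys_foldl_modify_key requests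
      (fun r => (r.1, r.2.2.2.2.1, r.2.2.2.2.2))
      ([] : List (String × String × String))
      (fun _ r => fun l => l ++ [(r.2.1, r.2.2.1, r.2.2.2.1)]) PySem.Dict.empty
  have hndA := PySem.Dict.nodup_keys_foldl_modify_key requests
      (fun r => (r.1, r.2.2.2.2.1, r.2.2.2.2.2))
      ([] : List (String × String × String))
      (fun _ r => fun l => l ++ [(r.2.1, r.2.2.1, r.2.2.2.1)]) PySem.Dict.empty
      PySem.Dict.nodup_keys_empty
  rw [PySem.Dict.items_eq_map_keys _ hndA ([] : List (String × String × String))]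
  rw [hkeysA]
  have : (PySem.Set.update (PySem.Dict.empty : PySem.Dict (String × String × String) (List (String × String × String))).keys
      (requests.map fun r => (r.1, r.2.2.2.2.1, r.2.2.2.2.2))) =
      PySem.Set.ofList (requests.map fun r => (r.1, r.2.2.2.2.1, r.2.2.2.2.2)) :=
    PySem.Set.update_nil_left _
  rw [this, List.map_map, List.nil_append]
  apply List.map_congr_left
  intro k _
  simp only [Function.comp]
  rw [getD_foldl_modify_key]
  simp only [PySem.Dict.getD_empty]
  rw [PySem.List.foldl_append_singleton_eq_map, List.nil_append, triple_fold]
  rw [List.foldl_map, List.foldl_map, List.foldl_map]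
  rw [← PySem.Set.update_map_eq_foldl_add, ← PySem.Set.update_map_eq_foldl_add,
      ← PySem.Set.update_map_eq_foldl_add]
  rfl

-- ===== VERDICT (by name: the statement is the Claim_ definition above) =====
theorem combine_requests_spec : Claim_equal_combine_requests := by
  intro requests _
  unfold Spec_combine_requests
  exact combine_requests_eq requests
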